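-- pv_equiv track=rewrite | github.com/thomasgnuttall/melody_exploration | src/pitch/carnatic.py | get_shrutis
-- ===== SOURCE A (Python) =====
-- shrutis = ['S','R1','R2','G1','R3','G2','G3','M1','M2','P','D1','D2','N1','D3','N2','N3']
--
-- svaras = ['S', 'R', 'G', 'M', 'P', 'D', 'N']
--
-- def get_shrutis(arohana, avarohana, return_svaras=False):
--     """
--     From input arohana and avarohana get a list of all unique shruti names in the raga
--
--     :param arohana: list of strings of srutis in arohana ('S', 'R1', 'G2' etc...)
--     :type arohana: list(str)
--     :param avarohana: list of strings of srutis in avarohana ('S', 'R1', 'G2' etc...)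
--     :type avarohana: list(str)
--     :param return_svaras: If True, only return the svara (without microtonal variation), default False
--     :type return_svaras: bool
--
--     :return: All srutis/svaras in raga in ascending pitch order
--     :rtype: list
--     """
--     all_freqs = set(arohana).union(set(avarohana))
--     all_svaras = set([''.join([f for f in freq if not f.isdigit()])\
--                      for freq in all_freqs])
--     if return_svaras:
--         # maintain order returning like this
--         return [x for x in svaras if x in all_svaras]
--
--     relevant_shrutis = []
--     for s in all_svaras:
--         relevant_shrutis += [x for x in shrutis if s in x]
--
--     # maintain order returning like this
--     return [x for x in shrutis if x in set(relevant_shrutis)]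
-- ===== SOURCE B (Python) =====
-- shrutis = ['S','R1','R2','G1','R3','G2','G3','M1','M2','P','D1','D2','N1','D3','N2','N3']
--
-- svaras = ['S', 'R', 'G', 'M', 'P', 'D', 'N']
--
-- def get_shrutis(arohana, avarohana, return_svaras=False):
--     # One pass over the constant tables: compute the digit-stripped svara set
--     # once, then classify each shruti/svara directly against it.
--     present = {''.join(c for c in f if not c.isdigit()) for f in arohana + avarohana}
--     if return_svaras:
--         return [v for v in svaras if v in present]
--     return [x for x in shrutis if any(s in x for s in present)]
-- ===== Notes on version B (the rewrite author's own statement) =====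
-- stated objective: simpler
-- what changed: B drops A's intermediate relevant_shrutis list and its svara-by-svara expansion loop plus second filtering pass: it builds the stripped-svara set in one comprehension and classifies each shruti directly with any(s in x), in a single pass over the shrutis table.
import Mathlib
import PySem

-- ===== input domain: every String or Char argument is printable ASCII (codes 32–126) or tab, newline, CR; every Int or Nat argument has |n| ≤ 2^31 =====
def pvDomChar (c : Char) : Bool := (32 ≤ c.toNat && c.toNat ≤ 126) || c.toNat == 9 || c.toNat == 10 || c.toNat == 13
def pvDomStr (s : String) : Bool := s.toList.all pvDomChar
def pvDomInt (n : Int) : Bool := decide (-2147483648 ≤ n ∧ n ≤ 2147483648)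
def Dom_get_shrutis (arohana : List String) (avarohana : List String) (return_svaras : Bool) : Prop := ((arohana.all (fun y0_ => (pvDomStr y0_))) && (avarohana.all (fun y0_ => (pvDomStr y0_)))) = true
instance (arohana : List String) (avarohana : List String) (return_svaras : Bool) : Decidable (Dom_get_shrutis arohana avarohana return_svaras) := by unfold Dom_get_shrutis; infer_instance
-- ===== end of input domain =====

-- B replaces A's svara-by-svara expansion loop (intermediate relevant_shrutis list +
-- second membership pass) with a single direct classification pass over the shrutis table.

-- module constants
def pvShrutis : List String := ["S","R1","R2","G1","R3","G2","G3","M1","M2","P","D1","D2","N1","D3","N2","N3"]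
def pvSvaras : List String := ["S", "R", "G", "M", "P", "D", "N"]

-- ''.join([f for f in freq if not f.isdigit()]) : exact — joining the kept characters
-- with the empty separator is the character filter itself (PySem.Chars.join_nil_singletons).
def pvStrip (freq : String) : String :=
  String.mk (freq.toList.filter (fun c => !PySem.Chars.isdigit c))

-- ===== PORT A =====
def get_shrutis (arohana : List String) (avarohana : List String) (return_svaras : Bool) : List String :=
  let all_freqs : PySem.Set String := PySem.Set.union (PySem.Set.ofList arohana) avarohana
  let all_svaras : PySem.Set String := PySem.Set.ofList (all_freqs.map pvStrip)
  if return_svaras then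
    pvSvaras.filter (fun x => PySem.Set.contains all_svaras x)
  else
    let relevant_shrutis : List String :=
      all_svaras.foldl (fun acc s => acc ++ pvShrutis.filter (fun x => PySem.Str.isIn s x)) []
    pvShrutis.filter (fun x => PySem.Set.contains (PySem.Set.ofList relevant_shrutis) x)

-- ===== PORT B =====
def get_shrutis_alt (arohana : List String) (avarohana : List String) (return_svaras : Bool) : List String :=
  let present : PySem.Set String := PySem.Set.ofList ((arohana ++ avarohana).map pvStrip)
  if return_svaras then
    pvSvaras.filter (fun v => PySem.Set.contains present v)
  else
    pvShrutis.filter (fun x => present.any (fun s => PySem.Str.isIn s x))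

-- ===== PRECONDITION & SPEC =====
def Spec_get_shrutis (arohana : List String) (avarohana : List String) (return_svaras : Bool) (out : List String) : Prop := out = get_shrutis_alt arohana avarohana return_svaras
instance (arohana : List String) (avarohana : List String) (return_svaras : Bool) (out : List String) : Decidable (Spec_get_shrutis arohana avarohana return_svaras out) := by unfold Spec_get_shrutis; infer_instance

-- ===== CLAIM (what is proved, stated in full; the proofs are below) =====
def Claim_equal_get_shrutis : Prop := ∀ (arohana : List String) (avarohana : List String) (return_svaras : Bool), Dom_get_shrutis arohana avarohana return_svaras → Spec_get_shrutis arohana avarohana return_svaras (get_shrutis arohana avarohana return_svaras)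

-- ===== LEMMAS AND PROOFS =====

-- the two stripped-svara sets have the same elements
lemma mem_svaras_iff (arohana avarohana : List String) (y : String) :
    (y ∈ PySem.Set.ofList ((PySem.Set.union (PySem.Set.ofList arohana) avarohana).map pvStrip)) ↔
    (y ∈ PySem.Set.ofList ((arohana ++ avarohana).map pvStrip)) := by
  simp only [PySem.Set.mem_ofList, List.mem_map, PySem.Set.mem_union, List.map_append,
    List.mem_append]
  constructor
  · rintro ⟨a, ha | ha, rfl⟩
    · exact Or.inl ⟨a, ha, rfl⟩
    · exact Or.inr ⟨a, ha, rfl⟩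
  · rintro (⟨a, ha, rfl⟩ | ⟨a, ha, rfl⟩)
    · exact ⟨a, Or.inl ha, rfl⟩
    · exact ⟨a, Or.inr ha, rfl⟩

-- ===== VERDICT (by name: the statement is the Claim_ definition above) =====
theorem get_shrutis_spec : Claim_equal_get_shrutis := by
  intro arohana avarohana return_svaras _
  unfold Spec_get_shrutis get_shrutis get_shrutis_alt
  cases return_svaras
  · -- main path: classify each shruti directly vs. expand-then-filter
    simp only [Bool.false_eq_true, if_false]
    rw [PySem.List.foldl_append_eq_flatMap]
    apply List.filter_congr
    intro x hx
    rw [Bool.eq_iff_iff, PySem.Set.contains_iff, PySem.Set.mem_ofList, List.nil_append,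
      List.mem_flatMap, List.any_eq_true]
    constructor
    · rintro ⟨s, hs, hmem⟩
      rw [List.mem_filter] at hmem
      exact ⟨s, (mem_svaras_iff _ _ s).mp hs, hmem.2⟩
    · rintro ⟨s, hs, hin⟩
      exact ⟨s, (mem_svaras_iff _ _ s).mpr hs, List.mem_filter.mpr ⟨hx, hin⟩⟩
  · -- return_svaras = True
    simp only [if_pos trivial]
    apply List.filter_congr
    intro v _
    rw [Bool.eq_iff_iff, PySem.Set.contains_iff, PySem.Set.contains_iff]
    exact mem_svaras_iff arohana avarohana v
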